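-- pv_equiv track=rewrite | github.com/AlbertChoe/Tucil1_13522081 | src/CLI/algo.py | trim_path
-- ===== SOURCE A (Python) =====
-- def find_matching(buffer, sequences):
--     total_reward = 0
--     buffer_str = ' '.join(buffer)
--     for sequence, reward in sequences:
--         sequence_str = ' '.join(sequence)
--         if sequence_str in buffer_str:
--             total_reward += int(reward)
--     return total_reward
--
-- def trim_path(matrix, sequences, best_path):
--     max_reward = find_matching([matrix[pos[0]][pos[1]]
--                                for pos in best_path], sequences)
--     for i in range(len(best_path), 0, -1):
--         temp_path = best_path[:i]
--         buffer = [matrix[pos[0]][pos[1]] for pos in temp_path]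
--         temp_reward = find_matching(buffer, sequences)
--
--         if temp_reward < max_reward:
--             return best_path[:i+1]
--
--     return best_path
-- ===== SOURCE B (Python) =====
-- def trim_path(matrix, sequences, best_path):
--     buffer = [matrix[p[0]][p[1]] for p in best_path]
--     n = len(buffer)
--     full = ' '.join(buffer)
--     # cum[idx] = len(' '.join(buffer[:idx+1]))
--     cum = []
--     acc = 0
--     for idx in range(n):
--         acc += len(buffer[idx]) + (1 if idx > 0 else 0)
--         cum.append(acc)
--     total = 0
--     delta = [0] * (n + 2)
--     for seq, reward in sequences:
--         s = ' '.join(seq)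
--         pos = full.find(s)
--         if pos < 0:
--             continue
--         end = pos + len(s)
--         # minimal index lo with cum[lo] >= end (binary search)
--         lo = 0
--         hi = n - 1
--         while lo < hi:
--             mid = (lo + hi) // 2
--             if cum[mid] >= end:
--                 hi = mid
--             else:
--                 lo = mid + 1
--         delta[lo + 1] += int(reward)
--         total += int(reward)
--     r = total
--     for i in range(n - 1, 0, -1):
--         r -= delta[i + 1]
--         if r < total:
--             return best_path[:i + 1]
--     return best_path
-- ===== Notes on version B (the rewrite author's own statement) =====
-- stated objective: faster
-- what changed: A recomputes the buffer and re-runs every sequence's substring search on each of the n prefixes; B computes each sequence's first-matching prefix length once (one find on the full joined string plus a binary search over cumulative lengths), buckets rewards into a delta array, and finds the cut with a single backward prefix-sum scan.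
import Mathlib
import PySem

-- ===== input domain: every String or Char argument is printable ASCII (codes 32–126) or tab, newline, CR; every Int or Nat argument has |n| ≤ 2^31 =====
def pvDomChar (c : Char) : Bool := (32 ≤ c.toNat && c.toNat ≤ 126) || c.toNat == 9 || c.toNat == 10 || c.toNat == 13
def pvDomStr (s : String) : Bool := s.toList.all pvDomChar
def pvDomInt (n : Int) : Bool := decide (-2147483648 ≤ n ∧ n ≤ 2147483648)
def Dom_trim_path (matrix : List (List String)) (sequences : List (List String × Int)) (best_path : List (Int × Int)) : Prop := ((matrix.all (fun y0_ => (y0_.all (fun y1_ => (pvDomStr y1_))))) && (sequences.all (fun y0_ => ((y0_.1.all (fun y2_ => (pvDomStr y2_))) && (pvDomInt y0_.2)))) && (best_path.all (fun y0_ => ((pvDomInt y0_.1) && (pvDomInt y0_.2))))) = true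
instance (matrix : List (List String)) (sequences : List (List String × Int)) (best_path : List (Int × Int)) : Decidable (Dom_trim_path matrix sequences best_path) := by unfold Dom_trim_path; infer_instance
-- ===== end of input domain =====

-- B replaces A's rescan of every prefix (recomputing all sequence matches per prefix) by one pass:
-- each sequence's first-match prefix length is found once (string find + binary search on cumulative
-- lengths), rewards are bucketed into a delta array, and one backward prefix-sum scan finds the cut.


-- ===== PORT A =====
-- matrix[pos[0]][pos[1]] (Python negative indexing; out-of-range raises, excluded by Pre_)
def pyAt2 (matrix : List (List String)) (pos : Int × Int) : String :=
  ((PySem.List.pyGet? matrix pos.1).bind (fun row => PySem.List.pyGet? row pos.2)).getD ""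

def find_matching (buffer : List String) (sequences : List (List String × Int)) : Int :=
  let buffer_str := PySem.Str.join " " buffer
  sequences.foldl (fun total sr =>
    if PySem.Str.isIn (PySem.Str.join " " sr.1) buffer_str then total + sr.2 else total) 0

-- 'for i in range(len(best_path), 0, -1)': the Nat argument is the current Python i
def trimLoopA (matrix : List (List String)) (sequences : List (List String × Int))
    (best_path : List (Int × Int)) (max_reward : Int) : Nat → List (Int × Int)
  | 0 => best_path
  | i + 1 =>
    let temp_path := PySem.List.slice best_path none (some ((i : Int) + 1))
    let buffer := temp_path.map (pyAt2 matrix)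
    let temp_reward := find_matching buffer sequences
    if temp_reward < max_reward then PySem.List.slice best_path none (some ((i : Int) + 2))
    else trimLoopA matrix sequences best_path max_reward i

def trim_path (matrix : List (List String)) (sequences : List (List String × Int)) (best_path : List (Int × Int)) : List (Int × Int) :=
  let max_reward := find_matching (best_path.map (pyAt2 matrix)) sequences
  trimLoopA matrix sequences best_path max_reward best_path.length

-- ===== PORT B =====
-- cum[idx] = len(' '.join(buffer[:idx+1])); one fold over range(n)
def cumStep (buffer : List String) (st : Int × List Int) (idx : Int) : Int × List Int :=
  let acc := st.1 + PySem.Str.len (PySem.List.pyGetD buffer idx "") + (if idx > 0 then 1 else 0)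
  (acc, st.2 ++ [acc])

-- 'while lo < hi: …' binary search for the least index with cum[index] >= e
def bsearchB (cum : List Int) (e : Int) (lo hi : Nat) : Nat :=
  if lo < hi then
    if e ≤ PySem.List.pyGetD cum (((lo + hi) / 2 : Nat) : Int) 0 then bsearchB cum e lo ((lo + hi) / 2)
    else bsearchB cum e ((lo + hi) / 2 + 1) hi
  else lo
termination_by hi - lo
decreasing_by all_goals omega

-- body of 'for seq, reward in sequences' accumulating (total, delta)
def seqStep (full : String) (cum : List Int) (n : Nat) (st : Int × List Int)
    (sr : List String × Int) : Int × List Int :=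
  let s := PySem.Str.join " " sr.1
  let pos := PySem.Str.find full s
  if pos < 0 then st
  else
    let e := pos + PySem.Str.len s
    let lo := bsearchB cum e 0 (n - 1)
    (st.1 + sr.2,
     PySem.List.pySetD st.2 ((lo : Int) + 1) (PySem.List.pyGetD st.2 ((lo : Int) + 1) 0 + sr.2))

-- 'for i in range(n - 1, 0, -1)': the Nat argument is the current Python i
def bLoop (best_path : List (Int × Int)) (delta : List Int) (total r : Int) : Nat → List (Int × Int)
  | 0 => best_path
  | j + 1 =>
    let r' := r - PySem.List.pyGetD delta ((j : Int) + 2) 0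
    if r' < total then PySem.List.slice best_path none (some ((j : Int) + 2))
    else bLoop best_path delta total r' j

def trim_path_alt (matrix : List (List String)) (sequences : List (List String × Int)) (best_path : List (Int × Int)) : List (Int × Int) :=
  let buffer := best_path.map (pyAt2 matrix)
  let n := buffer.length
  let full := PySem.Str.join " " buffer
  let cum := ((PySem.List.pyRange 0 (n : Int) 1).foldl (cumStep buffer) (0, [])).2
  let td := sequences.foldl (seqStep full cum n) (0, List.replicate (n + 2) 0)
  bLoop best_path td.2 td.1 td.1 (n - 1)

-- ===== PRECONDITION & SPEC =====
-- Pre_ excludes exactly the positions on which Python A raises IndexError (matrix[pos[0]][pos[1]]).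
def Pre_trim_path (matrix : List (List String)) (sequences : List (List String × Int)) (best_path : List (Int × Int)) : Prop :=
  ∀ p ∈ best_path, PySem.Raise.InRange matrix.length p.1 ∧
    PySem.Raise.InRange (PySem.List.pyGetD matrix p.1 []).length p.2
instance (matrix : List (List String)) (sequences : List (List String × Int)) (best_path : List (Int × Int)) : Decidable (Pre_trim_path matrix sequences best_path) := by unfold Pre_trim_path; infer_instance

def pvWitness_trim_path : List (List String) × (List (List String × Int)) × (List (Int × Int)) :=
  ([["a", "b"], ["c", "d"]], [(["a", "c"], 3), (["a"], 2)], [(0, 0), (1, 0), (1, 1)])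

def Spec_trim_path (matrix : List (List String)) (sequences : List (List String × Int)) (best_path : List (Int × Int)) (out : List (Int × Int)) : Prop := out = trim_path_alt matrix sequences best_path
instance (matrix : List (List String)) (sequences : List (List String × Int)) (best_path : List (Int × Int)) (out : List (Int × Int)) : Decidable (Spec_trim_path matrix sequences best_path out) := by unfold Spec_trim_path; infer_instance

-- ===== CLAIM (what is proved, stated in full; the proofs are below) =====
def Claim_equal_trim_path : Prop := ∀ (matrix : List (List String)) (sequences : List (List String × Int)) (best_path : List (Int × Int)), Dom_trim_path matrix sequences best_path → Pre_trim_path matrix sequences best_path → Spec_trim_path matrix sequences best_path (trim_path matrix sequences best_path)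

-- ===== LEMMAS AND PROOFS =====

-- the first-match prefix index B's arithmetic assigns to a sequence (n + 1 if it never matches)
def mIdxF (full : String) (cum : List Int) (n : Nat) (sr : List String × Int) : Nat :=
  let s := PySem.Str.join " " sr.1
  let pos := PySem.Str.find full s
  if pos < 0 then n + 1
  else bsearchB cum (pos + PySem.Str.len s) 0 (n - 1) + 1

-- sum of rewards of the sequences satisfying p
def sumIf (p : (List String × Int) → Bool) (seqs : List (List String × Int)) : Int :=
  (seqs.map (fun sr => if p sr then sr.2 else 0)).sum

-- length of ' '.join(buf[:i])
def prefLen (buf : List String) (i : Nat) : Int :=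
  ((PySem.Str.join " " (buf.take i)).toList.length : Int)

theorem join_append_singleton (sep w : List Char) (ws : List (List Char)) :
    PySem.Chars.join sep (ws ++ [w]) =
      if ws = [] then w else PySem.Chars.join sep ws ++ sep ++ w := by
  induction ws with
  | nil => simp [PySem.Chars.join_nil, PySem.Chars.join_singleton]
  | cons x t ih =>
    cases t with
    | nil =>
      simp [PySem.Chars.join_cons_cons, PySem.Chars.join_singleton, List.append_assoc]
    | cons y r =>
      simp only [List.cons_append, PySem.Chars.join_cons_cons]
      rw [show (y :: r) ++ [w] = (y :: (r ++ [w])) by simp] at *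
      simp only [ih, List.cons_ne_nil, if_false]
      simp

theorem join_take_prefix (sep : List Char) (ws : List (List Char)) (i : Nat) :
    PySem.Chars.join sep (ws.take i) <+: PySem.Chars.join sep ws := by
  induction ws generalizing i with
  | nil => simp
  | cons x t ih =>
    cases i with
    | zero => simp [PySem.Chars.join_nil]
    | succ j =>
      cases t with
      | nil => simp
      | cons y r =>
        cases j with
        | zero =>
          simp only [List.take_succ_cons, List.take_zero, PySem.Chars.join_singleton,
            PySem.Chars.join_cons_cons]
          exact ⟨sep ++ PySem.Chars.join sep (y :: r), by simp⟩
        | succ j' =>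
          simp only [List.take_succ_cons, PySem.Chars.join_cons_cons]
          have := ih (j' + 1)
          simpa using this

theorem infix_take_iff (s t : List Char) (L : Nat) :
    s <:+: t.take L ↔ ∃ j, j + s.length ≤ L ∧ s <+: t.drop j := by
  constructor
  · intro h
    rcases (PySem.Chars.exists_prefix_drop_iff_isIn s (t.take L)).mpr
      ((PySem.Chars.isIn_iff_infix s (t.take L)).mpr h) with ⟨j, hj⟩
    rw [List.drop_take] at hj
    rcases List.prefix_take_iff.mp hj with ⟨hpre, hlen⟩
    rcases Nat.eq_zero_or_pos s.length with h0 | hpos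
    · exact ⟨0, by omega, by simp [List.eq_nil_of_length_eq_zero h0]⟩
    · exact ⟨j, by omega, hpre⟩
  · rintro ⟨j, hjL, hpre⟩
    have : s <+: (t.take L).drop j := by
      rw [List.drop_take]
      exact List.prefix_take_iff.mpr ⟨hpre, by omega⟩
    exact ((PySem.Chars.isIn_iff_infix s (t.take L)).mp
      ((PySem.Chars.exists_prefix_drop_iff_isIn s (t.take L)).mp ⟨j, this⟩))

theorem isIn_take_iff (s t : List Char) (L : Nat) :
    PySem.Chars.isIn s (t.take L) = true ↔
      (0 ≤ PySem.Chars.find t s ∧ (PySem.Chars.find t s).toNat + s.length ≤ L) := by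
  rw [PySem.Chars.isIn_iff_infix, infix_take_iff]
  rcases lt_or_ge (PySem.Chars.find t s) 0 with hneg | hf
  · have hm1 : PySem.Chars.find t s = -1 := by
      have := PySem.Chars.neg_one_le_find t s; omega
    have hnot := (PySem.Chars.find_eq_neg_one_iff t s).mp hm1
    constructor
    · rintro ⟨j, _, hpre⟩
      exact absurd ((PySem.Chars.isIn_iff_infix s t).mp
        ((PySem.Chars.exists_prefix_drop_iff_isIn s t).mp ⟨j, hpre⟩)) hnot
    · rintro ⟨h0, _⟩; omega
  · obtain ⟨hocc, hmin⟩ := PySem.Chars.find_spec hf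
    constructor
    · rintro ⟨j, hjL, hpre⟩
      have hj : (PySem.Chars.find t s).toNat ≤ j := by
        by_contra hlt
        exact hmin j (by omega) hpre
      exact ⟨hf, by omega⟩
    · rintro ⟨_, hle⟩
      exact ⟨(PySem.Chars.find t s).toNat, hle, hocc⟩

theorem bsearch_bounds (cum : List Int) (e : Int) (lo hi : Nat) (h : lo ≤ hi) :
    lo ≤ bsearchB cum e lo hi ∧ bsearchB cum e lo hi ≤ hi := by
  rw [bsearchB]
  split
  · rename_i hlt
    split
    · have := bsearch_bounds cum e lo ((lo + hi) / 2) (by omega)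
      omega
    · have := bsearch_bounds cum e ((lo + hi) / 2 + 1) hi (by omega)
      omega
  · omega
termination_by hi - lo
decreasing_by all_goals omega

theorem bsearch_min (cum : List Int) (e : Int) (lo hi : Nat)
    (hlh : lo ≤ hi) (hhi : hi < cum.length)
    (hmono : ∀ j k : Nat, j ≤ k → k < cum.length →
      PySem.List.pyGetD cum (j : Int) 0 ≤ PySem.List.pyGetD cum (k : Int) 0)
    (hlo : ∀ k < lo, PySem.List.pyGetD cum (k : Int) 0 < e)
    (hhiv : e ≤ PySem.List.pyGetD cum (hi : Int) 0) :
    e ≤ PySem.List.pyGetD cum ((bsearchB cum e lo hi : Nat) : Int) 0 ∧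
      ∀ k < bsearchB cum e lo hi, PySem.List.pyGetD cum (k : Int) 0 < e := by
  rw [bsearchB]
  split
  · rename_i hlt
    split
    · rename_i hmid
      exact bsearch_min cum e lo ((lo + hi) / 2) (by omega) (by omega) hmono hlo hmid
    · rename_i hmid
      refine bsearch_min cum e ((lo + hi) / 2 + 1) hi (by omega) hhi hmono ?_ hhiv
      intro k hk
      have : PySem.List.pyGetD cum (k : Int) 0 ≤ PySem.List.pyGetD cum (((lo + hi) / 2 : Nat) : Int) 0 :=
        hmono k ((lo + hi) / 2) (by omega) (by omega)
      omega
  · have hl : lo = hi := by omega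
    subst hl
    exact ⟨hhiv, hlo⟩
termination_by hi - lo
decreasing_by all_goals omega

theorem prefLen_zero (buf : List String) : prefLen buf 0 = 0 := by
  simp [prefLen, PySem.Str.toList_join, PySem.Chars.join_nil]

theorem prefLen_succ (buf : List String) (k : Nat) (h : k < buf.length) :
    prefLen buf (k + 1) =
      prefLen buf k + ((buf[k].toList.length : Int)) + (if 0 < k then 1 else 0) := by
  unfold prefLen
  rw [PySem.Str.toList_join, PySem.Str.toList_join]
  rw [List.take_add_one, List.getElem?_eq_getElem h]
  simp only [Option.toList_some, List.map_append, List.map_cons, List.map_nil]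
  rw [join_append_singleton]
  rcases Nat.eq_zero_or_pos k with rfl | hk
  · simp [PySem.Chars.join_nil]
  · have hne : (buf.take k).map String.toList ≠ [] := by
      simp [List.map_eq_nil_iff, ← List.length_eq_zero_iff]
      omega
    rw [if_neg hne, if_pos hk]
    simp; push_cast; ring

theorem prefLen_mono (buf : List String) (i j : Nat) (h : i ≤ j) :
    prefLen buf i ≤ prefLen buf j := by
  unfold prefLen
  have : buf.take i = (buf.take j).take i := by rw [List.take_take, Nat.min_eq_left h]
  rw [this]
  have hpre := join_take_prefix (" ".toList) ((buf.take j).map String.toList) i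
  rw [← List.map_take] at hpre
  have := hpre.length_le
  simp only [PySem.Str.toList_join]
  omega

theorem cum_fold (buf : List String) (m : Nat) (hm : m ≤ buf.length) :
    (PySem.List.pyRange 0 (m : Int) 1).foldl (cumStep buf) (0, []) =
      (prefLen buf m, (List.range m).map (fun k => prefLen buf (k + 1))) := by
  induction m with
  | zero =>
    simp [PySem.List.pyRange, prefLen_zero]
  | succ k ih =>
    rw [show ((k + 1 : Nat) : Int) = (k : Int) + 1 by push_cast; ring,
      PySem.List.pyRange_one_succ_right (by positivity), List.foldl_append,
      ih (by omega)]
    simp only [List.foldl_cons, List.foldl_nil, cumStep]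
    rw [PySem.List.pyGetD_natCast, List.getD_eq_getElem buf "" (by omega : k < buf.length),
      PySem.Str.len_eq, List.range_succ, List.map_append,
      prefLen_succ buf k (by omega)]
    by_cases hk : 0 < k
    · simp only [hk, Int.natCast_pos, if_true, gt_iff_lt]
      simp [prefLen_succ buf k (by omega), hk]
    · simp only [show k = 0 by omega]
      norm_num
      simp [prefLen_succ buf 0 (by omega), prefLen_zero]

theorem sumIf_cons (p : (List String × Int) → Bool) (x : List String × Int)
    (t : List (List String × Int)) :
    sumIf p (x :: t) = (if p x then x.2 else 0) + sumIf p t := by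
  simp [sumIf]

theorem sumIf_congr (p q : (List String × Int) → Bool) (seqs : List (List String × Int))
    (h : ∀ sr ∈ seqs, p sr = q sr) : sumIf p seqs = sumIf q seqs := by
  unfold sumIf
  congr 1
  exact List.map_congr_left (fun sr hm => by rw [h sr hm])

theorem sumIf_decomp (f : (List String × Int) → Nat) (j : Nat) (seqs : List (List String × Int)) :
    sumIf (fun sr => decide (f sr ≤ j + 1)) seqs =
      sumIf (fun sr => decide (f sr ≤ j)) seqs + sumIf (fun sr => decide (f sr = j + 1)) seqs := by
  induction seqs with
  | nil => simp [sumIf]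
  | cons x t ih =>
    rw [sumIf_cons, sumIf_cons, sumIf_cons, ih]
    by_cases h1 : f x ≤ j
    · simp [h1, Nat.le_succ_of_le h1, show ¬ f x = j + 1 by omega]
      try ring
    · by_cases h2 : f x = j + 1
      · simp [h1, h2]
        try ring
      · simp [h1, h2, show ¬ f x ≤ j + 1 by omega]

theorem foldl_if_eq_sumIf (p : (List String × Int) → Bool) (seqs : List (List String × Int))
    (c : Int) :
    seqs.foldl (fun total sr => if p sr then total + sr.2 else total) c = c + sumIf p seqs := by
  induction seqs generalizing c with
  | nil => simp [sumIf]
  | cons x t ih =>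
    rw [List.foldl_cons, sumIf_cons, ih]
    by_cases h : p x <;> simp [h] <;> ring

theorem pyGetD_cumList (buf : List String) (k : Nat) (hk : k < buf.length) :
    PySem.List.pyGetD ((List.range buf.length).map (fun k => prefLen buf (k + 1))) (k : Int) 0 =
      prefLen buf (k + 1) := by
  rw [PySem.List.pyGetD_natCast]
  rw [List.getD_eq_getElem _ _ (by simpa using hk)]
  simp

theorem cumList_mono (buf : List String) :
    ∀ j k : Nat, j ≤ k → k < ((List.range buf.length).map (fun k => prefLen buf (k + 1))).length →
      PySem.List.pyGetD ((List.range buf.length).map (fun k => prefLen buf (k + 1))) (j : Int) 0 ≤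
        PySem.List.pyGetD ((List.range buf.length).map (fun k => prefLen buf (k + 1))) (k : Int) 0 := by
  intro j k hjk hk
  simp only [List.length_map, List.length_range] at hk
  rw [pyGetD_cumList buf j (by omega), pyGetD_cumList buf k hk]
  exact prefLen_mono buf (j + 1) (k + 1) (by omega)

-- ' '.join(buf[:i]) is literally the first prefLen(i) characters of ' '.join(buf)
theorem joinTake_eq_take (buf : List String) (i : Nat) :
    (PySem.Str.join " " (buf.take i)).toList =
      (PySem.Str.join " " buf).toList.take (prefLen buf i).toNat := by
  have hpre : (PySem.Str.join " " (buf.take i)).toList <+: (PySem.Str.join " " buf).toList := by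
    rw [PySem.Str.toList_join, PySem.Str.toList_join, List.map_take]
    exact join_take_prefix _ _ i
  have := List.prefix_iff_eq_take.mp hpre
  rw [this]
  congr 1

-- the central characterization: a sequence matches the length-i prefix of the path
-- iff B's first-match index for it is at most i
theorem match_iff (buf : List String) (sr : List String × Int) (i : Nat)
    (hn : 1 ≤ buf.length) (h1 : 1 ≤ i) (hin : i ≤ buf.length) :
    PySem.Str.isIn (PySem.Str.join " " sr.1) (PySem.Str.join " " (buf.take i)) = true ↔
      mIdxF (PySem.Str.join " " buf) ((List.range buf.length).map (fun k => prefLen buf (k + 1)))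
        buf.length sr ≤ i := by
  set n := buf.length with hnn
  set full := PySem.Str.join " " buf with hfull
  set cum := (List.range n).map (fun k => prefLen buf (k + 1)) with hcum
  set s := PySem.Str.join " " sr.1 with hs
  have hcumlen : cum.length = n := by simp [hcum]
  rw [PySem.Str.isIn_eq, joinTake_eq_take buf i, isIn_take_iff]
  unfold mIdxF
  rw [← hs]
  simp only [← hfull]
  rw [PySem.Str.find_eq, PySem.Str.len_eq]
  set f := PySem.Chars.find full.toList s.toList with hf
  have hspec0 := fun h : 0 ≤ f =>
    PySem.Chars.find_spec (s := full.toList) (sub := s.toList) (hf ▸ h)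
  rw [← hf] at hspec0
  have hfle : f ≤ (full.toList.length : Int) := by
    rw [hf]; exact PySem.Chars.find_le_length _ _
  clear_value f
  by_cases hfe : f < 0
  · rw [if_pos hfe]
    constructor
    · rintro ⟨h0, _⟩
      omega
    · intro h; omega
  · rw [if_neg hfe]
    push_neg at hfe
    have hspec := hspec0 hfe
    have hocc : f.toNat + s.toList.length ≤ full.toList.length := by
      have h2 := hspec.1.length_le
      rw [List.length_drop] at h2
      omega
    have hLen : prefLen buf n = (full.toList.length : Int) := by
      simp [prefLen, hnn, List.take_length, hfull]
    set e := f + (s.toList.length : Int) with hee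
    clear_value e
    have hb := bsearch_min cum e 0 (n - 1) (by omega) (by rw [hcumlen]; omega)
      (by rw [hcum]; exact cumList_mono buf)
      (by intro k hk; omega)
      (by rw [hcum, pyGetD_cumList buf (n - 1) (by omega), show n - 1 + 1 = n by omega, hLen]
          omega)
    have hbb := bsearch_bounds cum e 0 (n - 1) (by omega)
    set res := bsearchB cum e 0 (n - 1) with hres
    have hnn0 : (0:Int) ≤ prefLen buf i := by simp [prefLen]
    constructor
    · rintro ⟨h0, hle⟩
      have hiv : e ≤ PySem.List.pyGetD cum ((i - 1 : Nat) : Int) 0 := by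
        rw [hcum, pyGetD_cumList buf (i - 1) (by omega), show i - 1 + 1 = i by omega]
        omega
      by_contra hgt
      have := hb.2 (i - 1) (by omega)
      omega
    · intro hri
      have hx : e ≤ PySem.List.pyGetD cum ((i - 1 : Nat) : Int) 0 := by
        calc e ≤ PySem.List.pyGetD cum (res : Int) 0 := hb.1
        _ ≤ _ := by
            rw [hcum]
            exact cumList_mono buf res (i - 1) (by omega) (by rw [← hcum, hcumlen]; omega)
      rw [hcum, pyGetD_cumList buf (i - 1) (by omega), show i - 1 + 1 = i by omega] at hx
      exact ⟨hfe, by omega⟩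

theorem pyGetD_replicate_zero (m k : Nat) :
    PySem.List.pyGetD (List.replicate m (0 : Int)) (k : Int) 0 = 0 := by
  rw [PySem.List.pyGetD_natCast]
  rcases lt_or_ge k m with h | h
  · rw [List.getD_eq_getElem _ _ (by simpa using h)]
    simp
  · rw [List.getD_eq_default _ _ (by simpa using h)]

theorem fm_eq (buf : List String) (sequences : List (List String × Int)) (i : Nat)
    (hn : 1 ≤ buf.length) (h1 : 1 ≤ i) (hin : i ≤ buf.length) :
    find_matching (buf.take i) sequences =
      sumIf (fun sr => decide (mIdxF (PySem.Str.join " " buf)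
        ((List.range buf.length).map (fun k => prefLen buf (k + 1))) buf.length sr ≤ i))
        sequences := by
  unfold find_matching
  rw [foldl_if_eq_sumIf (fun sr => PySem.Str.isIn (PySem.Str.join " " sr.1)
    (PySem.Str.join " " (buf.take i))) sequences 0, zero_add]
  exact sumIf_congr _ _ sequences (fun sr _ => by
    rw [Bool.eq_iff_iff]
    simp only [decide_eq_true_eq]
    exact match_iff buf sr i hn h1 hin)

theorem seqStep_neg (full : String) (cum : List Int) (n : Nat) (st : Int × List Int)
    (x : List String × Int) (hpos : PySem.Str.find full (PySem.Str.join " " x.1) < 0) :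
    seqStep full cum n st x = st := by
  simp only [seqStep]
  rw [if_pos hpos]

theorem seqStep_pos (full : String) (cum : List Int) (n : Nat) (st : Int × List Int)
    (x : List String × Int) (hpos : ¬ PySem.Str.find full (PySem.Str.join " " x.1) < 0) :
    seqStep full cum n st x =
      (st.1 + x.2,
        PySem.List.pySetD st.2
          ((bsearchB cum (PySem.Str.find full (PySem.Str.join " " x.1) +
              PySem.Str.len (PySem.Str.join " " x.1)) 0 (n - 1) : Int) + 1)
          (PySem.List.pyGetD st.2
            ((bsearchB cum (PySem.Str.find full (PySem.Str.join " " x.1) +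
                PySem.Str.len (PySem.Str.join " " x.1)) 0 (n - 1) : Int) + 1) 0 + x.2)) := by
  simp only [seqStep]
  rw [if_neg hpos]

theorem mIdxF_neg (full : String) (cum : List Int) (n : Nat) (x : List String × Int)
    (hpos : PySem.Str.find full (PySem.Str.join " " x.1) < 0) :
    mIdxF full cum n x = n + 1 := by
  simp only [mIdxF]
  rw [if_pos hpos]

theorem mIdxF_pos (full : String) (cum : List Int) (n : Nat) (x : List String × Int)
    (hpos : ¬ PySem.Str.find full (PySem.Str.join " " x.1) < 0) :
    mIdxF full cum n x = bsearchB cum (PySem.Str.find full (PySem.Str.join " " x.1) +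
      PySem.Str.len (PySem.Str.join " " x.1)) 0 (n - 1) + 1 := by
  simp only [mIdxF]
  rw [if_neg hpos]

theorem seqfold_fst (full : String) (cum : List Int) (n : Nat) (hn : 1 ≤ n) :
    ∀ (seqs : List (List String × Int)) (st : Int × List Int),
      (seqs.foldl (seqStep full cum n) st).1 =
        st.1 + sumIf (fun sr => decide (mIdxF full cum n sr ≤ n)) seqs := by
  intro seqs
  induction seqs with
  | nil => intro st; simp [sumIf]
  | cons x t ih =>
    intro st
    rw [List.foldl_cons, ih, sumIf_cons]
    by_cases hpos : PySem.Str.find full (PySem.Str.join " " x.1) < 0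
    · rw [seqStep_neg full cum n st x hpos, mIdxF_neg full cum n x hpos]
      simp [show ¬ (n + 1 ≤ n) by omega]
    · rw [seqStep_pos full cum n st x hpos, mIdxF_pos full cum n x hpos]
      have hbb := bsearch_bounds cum (PySem.Str.find full (PySem.Str.join " " x.1) +
        PySem.Str.len (PySem.Str.join " " x.1)) 0 (n - 1) (by omega)
      have hle : bsearchB cum (PySem.Str.find full (PySem.Str.join " " x.1) +
        PySem.Str.len (PySem.Str.join " " x.1)) 0 (n - 1) + 1 ≤ n := by omega
      rw [decide_eq_true hle]
      simp only [if_true]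
      ring

theorem seqfold_delta (full : String) (cum : List Int) (n : Nat) (hn : 1 ≤ n) (k : Nat)
    (hk : k ≤ n) :
    ∀ (seqs : List (List String × Int)) (st : Int × List Int), st.2.length = n + 2 →
      PySem.List.pyGetD (seqs.foldl (seqStep full cum n) st).2 (k : Int) 0 =
        PySem.List.pyGetD st.2 (k : Int) 0 +
          sumIf (fun sr => decide (mIdxF full cum n sr = k)) seqs := by
  intro seqs
  induction seqs with
  | nil => intro st _; simp [sumIf]
  | cons x t ih =>
    intro st hst
    rw [List.foldl_cons, sumIf_cons]
    by_cases hpos : PySem.Str.find full (PySem.Str.join " " x.1) < 0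
    · rw [seqStep_neg full cum n st x hpos, mIdxF_neg full cum n x hpos, ih st hst]
      simp [show ¬ (n + 1 = k) by omega]
    · rw [seqStep_pos full cum n st x hpos, mIdxF_pos full cum n x hpos]
      set lo := bsearchB cum (PySem.Str.find full (PySem.Str.join " " x.1) +
        PySem.Str.len (PySem.Str.join " " x.1)) 0 (n - 1) with hlo
      have hbb := bsearch_bounds cum (PySem.Str.find full (PySem.Str.join " " x.1) +
        PySem.Str.len (PySem.Str.join " " x.1)) 0 (n - 1) (by omega)
      rw [← hlo] at hbb
      rw [ih _ (by simpa [PySem.List.length_pySetD] using hst)]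
      have hcast : ((lo : Int) + 1) = (((lo + 1 : Nat)) : Int) := by push_cast; ring
      rw [hcast, PySem.List.pyGetD_pySetD_natCast st.2 (lo + 1) k _ 0 (by omega)]
      by_cases hke : k = lo + 1
      · simp only [hke, if_pos rfl, decide_eq_true_eq, if_pos rfl]
        simp
        ring
      · rw [if_neg hke]
        simp [show ¬ (lo + 1 = k) from fun h => hke h.symm]

theorem loops_eq (matrix : List (List String)) (sequences : List (List String × Int))
    (best_path : List (Int × Int)) (buf : List String)
    (hbuf : buf = best_path.map (pyAt2 matrix)) (hn : 1 ≤ buf.length)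
    (T : Int) (Dl : List Int)
    (hD : ∀ k : Nat, 1 ≤ k → k ≤ buf.length → PySem.List.pyGetD Dl (k : Int) 0 =
      sumIf (fun sr => decide (mIdxF (PySem.Str.join " " buf)
        ((List.range buf.length).map (fun k => prefLen buf (k + 1))) buf.length sr = k)) sequences) :
    ∀ j : Nat, j ≤ buf.length - 1 →
      bLoop best_path Dl T
        (sumIf (fun sr => decide (mIdxF (PySem.Str.join " " buf)
          ((List.range buf.length).map (fun k => prefLen buf (k + 1))) buf.length sr ≤ j + 1))
          sequences) j
        = trimLoopA matrix sequences best_path T j := by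
  intro j
  induction j with
  | zero => intro _; simp [bLoop, trimLoopA]
  | succ j ih =>
    intro hj
    simp only [bLoop, trimLoopA]
    have hcast2 : ((j : Int) + 2) = (((j + 2 : Nat)) : Int) := by push_cast; ring
    have hr : sumIf (fun sr => decide (mIdxF (PySem.Str.join " " buf)
          ((List.range buf.length).map (fun k => prefLen buf (k + 1))) buf.length sr ≤ j + 1 + 1))
          sequences - PySem.List.pyGetD Dl ((j : Int) + 2) 0 =
        sumIf (fun sr => decide (mIdxF (PySem.Str.join " " buf)
          ((List.range buf.length).map (fun k => prefLen buf (k + 1))) buf.length sr ≤ j + 1))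
          sequences := by
      rw [hcast2, hD (j + 2) (by omega) (by omega),
        sumIf_decomp (fun sr => mIdxF (PySem.Str.join " " buf)
          ((List.range buf.length).map (fun k => prefLen buf (k + 1))) buf.length sr) (j + 1)
          sequences]
      ring
    rw [hr]
    have hcast1 : ((j : Int) + 1) = (((j + 1 : Nat)) : Int) := by push_cast; ring
    have htr : find_matching
        ((PySem.List.slice best_path none (some ((j : Int) + 1))).map (pyAt2 matrix)) sequences =
        sumIf (fun sr => decide (mIdxF (PySem.Str.join " " buf)
          ((List.range buf.length).map (fun k => prefLen buf (k + 1))) buf.length sr ≤ j + 1))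
          sequences := by
      rw [hcast1, PySem.List.slice_to_natCast, List.map_take, ← hbuf]
      exact fm_eq buf sequences (j + 1) hn (by omega) (by omega)
    rw [htr]
    split_ifs with hcond
    · rfl
    · exact ih (by omega)

theorem alt_eq (matrix : List (List String)) (sequences : List (List String × Int))
    (best_path : List (Int × Int)) :
    trim_path_alt matrix sequences best_path =
      bLoop best_path (sequences.foldl (seqStep (PySem.Str.join " " (best_path.map (pyAt2 matrix))) ((List.range (best_path.map (pyAt2 matrix)).length).map (fun k => prefLen (best_path.map (pyAt2 matrix)) (k + 1))) (best_path.map (pyAt2 matrix)).length) (0, List.replicate ((best_path.map (pyAt2 matrix)).length + 2) 0)).2 (sequences.foldl (seqStep (PySem.Str.join " " (best_path.map (pyAt2 matrix))) ((List.range (best_path.map (pyAt2 matrix)).length).map (fun k => prefLen (best_path.map (pyAt2 matrix)) (k + 1))) (best_path.map (pyAt2 matrix)).length) (0, List.replicate ((best_path.map (pyAt2 matrix)).length + 2) 0)).1 (sequences.foldl (seqStep (PySem.Str.join " " (best_path.map (pyAt2 matrix))) ((List.range (best_path.map (pyAt2 matrix)).length).map (fun k => prefLen (best_path.map (pyAt2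 matrix)) (k + 1))) (best_path.map (pyAt2 matrix)).length) (0, List.replicate ((best_path.map (pyAt2 matrix)).length + 2) 0)).1 ((best_path.map (pyAt2 matrix)).length - 1) := by
  simp only [trim_path_alt]
  rw [cum_fold (best_path.map (pyAt2 matrix)) (best_path.map (pyAt2 matrix)).length le_rfl]

theorem a_eq (matrix : List (List String)) (sequences : List (List String × Int))
    (best_path : List (Int × Int)) :
    trim_path matrix sequences best_path =
      trimLoopA matrix sequences best_path
        (find_matching (best_path.map (pyAt2 matrix)) sequences) best_path.length := rfl

theorem trim_path_spec : Claim_equal_trim_path := by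
  intro matrix sequences best_path _ _
  unfold Spec_trim_path
  rw [a_eq, alt_eq]
  have hlen : (best_path.map (pyAt2 matrix)).length = best_path.length := by simp
  rcases Nat.eq_zero_or_pos (best_path.map (pyAt2 matrix)).length with h0 | h1
  · rw [show best_path.length = 0 by omega, h0]
    simp [trimLoopA, bLoop]
  · have hT : (sequences.foldl (seqStep (PySem.Str.join " " (best_path.map (pyAt2 matrix))) ((List.range (best_path.map (pyAt2 matrix)).length).map (fun k => prefLen (best_path.map (pyAt2 matrix)) (k + 1))) (best_path.map (pyAt2 matrix)).length) (0, List.replicate ((best_path.map (pyAt2 matrix)).length + 2) 0)).1 =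
        sumIf (fun sr => decide (mIdxF (PySem.Str.join " " (best_path.map (pyAt2 matrix))) ((List.range (best_path.map (pyAt2 matrix)).length).map (fun k => prefLen (best_path.map (pyAt2 matrix)) (k + 1))) (best_path.map (pyAt2 matrix)).length sr ≤ (best_path.map (pyAt2 matrix)).length)) sequences := by
      rw [seqfold_fst (PySem.Str.join " " (best_path.map (pyAt2 matrix))) ((List.range (best_path.map (pyAt2 matrix)).length).map (fun k => prefLen (best_path.map (pyAt2 matrix)) (k + 1))) (best_path.map (pyAt2 matrix)).length h1 sequences
        (0, List.replicate ((best_path.map (pyAt2 matrix)).length + 2) 0)]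
      ring
    have hD : ∀ k : Nat, 1 ≤ k → k ≤ (best_path.map (pyAt2 matrix)).length →
        PySem.List.pyGetD (sequences.foldl (seqStep (PySem.Str.join " " (best_path.map (pyAt2 matrix))) ((List.range (best_path.map (pyAt2 matrix)).length).map (fun k => prefLen (best_path.map (pyAt2 matrix)) (k + 1))) (best_path.map (pyAt2 matrix)).length) (0, List.replicate ((best_path.map (pyAt2 matrix)).length + 2) 0)).2 (k : Int) 0 =
          sumIf (fun sr => decide (mIdxF (PySem.Str.join " " (best_path.map (pyAt2 matrix))) ((List.range (best_path.map (pyAt2 matrix)).length).map (fun k => prefLen (best_path.map (pyAt2 matrix)) (k + 1))) (best_path.map (pyAt2 matrix)).length sr = k)) sequences := by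
      intro k hk1 hk2
      rw [seqfold_delta (PySem.Str.join " " (best_path.map (pyAt2 matrix))) ((List.range (best_path.map (pyAt2 matrix)).length).map (fun k => prefLen (best_path.map (pyAt2 matrix)) (k + 1))) (best_path.map (pyAt2 matrix)).length h1 k hk2 sequences
        (0, List.replicate ((best_path.map (pyAt2 matrix)).length + 2) 0) (by simp),
        pyGetD_replicate_zero]
      ring
    have hmr : find_matching (best_path.map (pyAt2 matrix)) sequences =
        sumIf (fun sr => decide (mIdxF (PySem.Str.join " " (best_path.map (pyAt2 matrix))) ((List.range (best_path.map (pyAt2 matrix)).length).map (fun k => prefLen (best_path.map (pyAt2 matrix)) (k + 1))) (best_path.map (pyAt2 matrix)).length sr ≤ (best_path.map (pyAt2 matrix)).length)) sequences := by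
      conv_lhs => rw [← List.take_length (l := (best_path.map (pyAt2 matrix)))]
      exact fm_eq (best_path.map (pyAt2 matrix)) sequences (best_path.map (pyAt2 matrix)).length h1 h1 le_rfl
    have hstep : trimLoopA matrix sequences best_path (find_matching (best_path.map (pyAt2 matrix)) sequences)
        best_path.length =
        trimLoopA matrix sequences best_path (find_matching (best_path.map (pyAt2 matrix)) sequences)
          ((best_path.map (pyAt2 matrix)).length - 1) := by
      rw [← hlen, show (best_path.map (pyAt2 matrix)).length = ((best_path.map (pyAt2 matrix)).length - 1) + 1 by omega]
      simp only [trimLoopA]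
      rw [show (((best_path.map (pyAt2 matrix)).length - 1 : Nat) : Int) + 1 = (((best_path.map (pyAt2 matrix)).length : Nat) : Int) by push_cast; omega,
        PySem.List.slice_to_natCast, List.map_take, List.take_length]
      rw [if_neg (lt_irrefl (find_matching (best_path.map (pyAt2 matrix)) sequences))]
      congr 1 <;> omega
    have hidx : sumIf (fun sr => decide (mIdxF (PySem.Str.join " " (best_path.map (pyAt2 matrix))) ((List.range (best_path.map (pyAt2 matrix)).length).map (fun k => prefLen (best_path.map (pyAt2 matrix)) (k + 1))) (best_path.map (pyAt2 matrix)).length sr ≤ ((best_path.map (pyAt2 matrix)).length - 1) + 1)) sequences = (sequences.foldl (seqStep (PySem.Str.join " " (best_path.map (pyAt2 matrix))) ((List.range (best_path.map (pyAt2 matrix)).length).map (fun k => prefLen (best_path.map (pyAt2 matrix)) (k + 1))) (best_path.map (pyAt2 matrix)).length) (0, List.replicate ((best_path.map (pyAt2 matrix)).length + 2) 0)).1 := by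
      rw [hT]; congr 2; funext sr; congr 2; omega
    rw [hstep]
    rw [show find_matching (best_path.map (pyAt2 matrix)) sequences = (sequences.foldl (seqStep (PySem.Str.join " " (best_path.map (pyAt2 matrix))) ((List.range (best_path.map (pyAt2 matrix)).length).map (fun k => prefLen (best_path.map (pyAt2 matrix)) (k + 1))) (best_path.map (pyAt2 matrix)).length) (0, List.replicate ((best_path.map (pyAt2 matrix)).length + 2) 0)).1 by rw [hT, hmr]]
    rw [← loops_eq matrix sequences best_path (best_path.map (pyAt2 matrix)) rfl h1 (sequences.foldl (seqStep (PySem.Str.join " " (best_path.map (pyAt2 matrix))) ((List.range (best_path.map (pyAt2 matrix)).length).map (fun k => prefLen (best_path.map (pyAt2 matrix)) (k + 1))) (best_path.map (pyAt2 matrix)).length) (0, List.replicate ((best_path.map (pyAt2 matrix)).length + 2) 0)).1 (sequences.foldl (seqStep (PySem.Str.join " " (best_path.map (pyAt2 matrix))) ((List.range (best_path.map (pyAt2 matrix)).length).map (fun k => prefLen (best_path.map (pyAt2 matrix)) (k + 1))) (best_path.map (pyAt2 matrix)).length) (0, List.replicate ((best_path.map (pyAt2 matrix)).length + 2) 0)).2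 hD
      ((best_path.map (pyAt2 matrix)).length - 1) le_rfl]
    rw [hidx]
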